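-- pv_equiv track=rewrite | github.com/houseepoch/project-greenlight | greenlight/core/ingestion.py | _collect_world_hints
-- ===== SOURCE A (Python) =====
-- def _collect_world_hints(processed_images: list[dict]) -> dict:
--     """Collect world hints from processed images."""
--     hints = {
--         "time_periods": [],
--         "cultural_contexts": [],
--         "visual_styles": [],
--         "moods": [],
--         "color_palettes": [],
--     }
--
--     for img in processed_images:
--         wh = img.get("world_hints", {})
--         if wh.get("time_period"):
--             hints["time_periods"].append(wh["time_period"])
--         if wh.get("cultural_context"):
--             hints["cultural_contexts"].append(wh["cultural_context"])
--         if wh.get("visual_style"):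
--             hints["visual_styles"].append(wh["visual_style"])
--         if wh.get("mood"):
--             hints["moods"].append(wh["mood"])
--         if wh.get("color_palette"):
--             hints["color_palettes"].append(wh["color_palette"])
--
--     return hints
-- ===== SOURCE B (Python) =====
-- _FIELDS = [
--     ("time_period", "time_periods"),
--     ("cultural_context", "cultural_contexts"),
--     ("visual_style", "visual_styles"),
--     ("mood", "moods"),
--     ("color_palette", "color_palettes"),
-- ]
--
--
-- def _collect_world_hints(processed_images: list[dict]) -> dict:
--     """Collect world hints by divide and conquer: solve halves, merge by list concatenation."""
--
--     def collect(lo: int, hi: int) -> dict: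
--         if hi - lo == 0:
--             return {plural: [] for _, plural in _FIELDS}
--         if hi - lo == 1:
--             wh = processed_images[lo].get("world_hints", {})
--             return {plural: ([wh[src]] if wh.get(src) else []) for src, plural in _FIELDS}
--         mid = (lo + hi) // 2
--         left = collect(lo, mid)
--         right = collect(mid, hi)
--         return {key: left[key] + right[key] for key in left}
--
--     return collect(0, len(processed_images))
-- ===== Notes on version B (the rewrite author's own statement) =====
-- stated objective: alternative
-- what changed: Replaces A's single left-to-right pass with five unrolled if/append branches by a table-driven divide-and-conquer: recursively collect the hints of each half of the image list and merge the two partial results by per-key list concatenation (correct because concatenation is associative and keeps order).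
import Mathlib
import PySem

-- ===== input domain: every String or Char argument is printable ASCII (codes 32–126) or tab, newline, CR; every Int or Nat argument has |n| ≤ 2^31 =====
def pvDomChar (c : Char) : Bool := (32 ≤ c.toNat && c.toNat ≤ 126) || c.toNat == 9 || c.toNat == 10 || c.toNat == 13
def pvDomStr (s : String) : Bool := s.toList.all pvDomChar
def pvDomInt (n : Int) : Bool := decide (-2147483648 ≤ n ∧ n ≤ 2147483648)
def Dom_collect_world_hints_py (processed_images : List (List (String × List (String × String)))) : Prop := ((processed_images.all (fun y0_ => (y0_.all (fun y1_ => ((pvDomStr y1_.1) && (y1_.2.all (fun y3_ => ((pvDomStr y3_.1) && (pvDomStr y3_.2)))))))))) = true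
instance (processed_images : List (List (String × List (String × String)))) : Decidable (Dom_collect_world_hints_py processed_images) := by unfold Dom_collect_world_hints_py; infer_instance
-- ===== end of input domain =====

-- B replaces A's single left-to-right pass with five unrolled if/append branches by a
-- table-driven divide-and-conquer: solve each half of the image list recursively and merge
-- the partial results by per-key list concatenation (alternative decomposition, same result).

-- ===== PORT A =====
-- dict.get on an association list: first match (exact for Python dicts, which have unique keys)
def pvGet? (d : List (String × String)) (k : String) : Option String :=
  (d.find? (fun p => p.1 == k)).map (·.2)

-- img.get("world_hints", {})
def pvWH (img : List (String × List (String × String))) : List (String × String) :=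
  ((img.find? (fun p => p.1 == "world_hints")).map (·.2)).getD []

-- Python truthiness of wh.get(k): some non-empty string
def pvTruthy : Option String → Bool
  | some s => s ≠ ""
  | none => false

-- the body of A's for-loop: five guarded appends into the hints dict
def pvAStep (hints : PySem.Dict String (List String)) (img : List (String × List (String × String))) :
    PySem.Dict String (List String) :=
  let wh := pvWH img
  let hints := if pvTruthy (pvGet? wh "time_period") then
      hints.modify "time_periods" [] (· ++ [(pvGet? wh "time_period").getD ""]) else hints
  let hints := if pvTruthy (pvGet? wh "cultural_context") then
      hints.modify "cultural_contexts" [] (· ++ [(pvGet? wh "cultural_context").getD ""]) else hints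
  let hints := if pvTruthy (pvGet? wh "visual_style") then
      hints.modify "visual_styles" [] (· ++ [(pvGet? wh "visual_style").getD ""]) else hints
  let hints := if pvTruthy (pvGet? wh "mood") then
      hints.modify "moods" [] (· ++ [(pvGet? wh "mood").getD ""]) else hints
  let hints := if pvTruthy (pvGet? wh "color_palette") then
      hints.modify "color_palettes" [] (· ++ [(pvGet? wh "color_palette").getD ""]) else hints
  hints

def collect_world_hints_py (processed_images : List (List (String × List (String × String)))) : List (String × List String) :=
  let hints : PySem.Dict String (List String) :=
    (((((PySem.Dict.empty.insert "time_periods" []).insert "cultural_contexts" []).insert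
        "visual_styles" []).insert "moods" []).insert "color_palettes" [])
  (processed_images.foldl pvAStep hints).items

-- ===== PORT B =====
-- the _FIELDS table of Source B: (source field, output key)
def pvFieldMap : List (String × String) :=
  [("time_period", "time_periods"), ("cultural_context", "cultural_contexts"),
   ("visual_style", "visual_styles"), ("mood", "moods"), ("color_palette", "color_palettes")]

-- [wh[src]] if wh.get(src) else []  as an Option (some = the one-element list's element)
def pvColumn (src : String) (img : List (String × List (String × String))) : Option String :=
  match pvGet? (pvWH img) src with
  | some s => if s ≠ "" then some s else none
  | none => none

-- leaf case hi - lo == 1 of Source B's collect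
def pvLeaf (img : List (String × List (String × String))) : List (String × List String) :=
  pvFieldMap.map (fun p => (p.2, (pvColumn p.1 img).toList))

-- right[key]: lookup in the recursive result (key is always present; default never used)
def pvLookup (r : List (String × List String)) (k : String) : List String :=
  ((r.find? (fun p => p.1 == k)).map (·.2)).getD []

-- {key: left[key] + right[key] for key in left}
def pvMerge (l r : List (String × List String)) : List (String × List String) :=
  l.map (fun p => (p.1, p.2 ++ pvLookup r p.1))

-- Source B's collect(lo, hi) works on the segment processed_images[lo:hi]; the recursion on the
-- list with take/drop at length/2 visits exactly the same segments ((lo+hi)//2 - lo = (hi-lo)//2).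
def pvDC : List (List (String × List (String × String))) → List (String × List String)
  | [] => pvFieldMap.map (fun p => (p.2, []))
  | [img] => pvLeaf img
  | x :: y :: rest =>
      pvMerge (pvDC ((x :: y :: rest).take ((x :: y :: rest).length / 2)))
              (pvDC ((x :: y :: rest).drop ((x :: y :: rest).length / 2)))
termination_by l => l.length
decreasing_by
  · simp; omega
  · simp; omega

def collect_world_hints_py_alt (processed_images : List (List (String × List (String × String)))) : List (String × List String) :=
  pvDC processed_images

-- ===== PRECONDITION & SPEC =====
def Spec_collect_world_hints_py (processed_images : List (List (String × List (String × String)))) (out : List (String × List String)) : Prop := out = collect_world_hints_py_alt processed_images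
instance (processed_images : List (List (String × List (String × String)))) (out : List (String × List String)) : Decidable (Spec_collect_world_hints_py processed_images out) := by unfold Spec_collect_world_hints_py; infer_instance

-- ===== CLAIM =====
def Claim_equal_collect_world_hints_py : Prop := ∀ (processed_images : List (List (String × List (String × String)))), Dom_collect_world_hints_py processed_images → Spec_collect_world_hints_py processed_images (collect_world_hints_py processed_images)

-- ===== LEMMAS AND PROOFS =====

-- common normal form: the table with each output column as a filterMap over the images
def pvS (imgs : List (List (String × List (String × String)))) : List (String × List String) :=
  pvFieldMap.map (fun p => (p.2, imgs.filterMap (pvColumn p.1)))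

-- A's hints dict always has exactly the five fixed keys, in insertion order
def pvMk5 (a b c d e : List String) : PySem.Dict String (List String) :=
  PySem.Dict.mk [("time_periods", a), ("cultural_contexts", b), ("visual_styles", c),
                 ("moods", d), ("color_palettes", e)]

-- the value A appends under the truthiness guard, as an Option (none = no append)
def pvColOf : Option String → Option String
  | some s => if s ≠ "" then some s else none
  | none => none

theorem pvColumn_eq (src : String) (img : List (String × List (String × String))) :
    pvColumn src img = pvColOf (pvGet? (pvWH img) src) := by
  unfold pvColumn pvColOf; cases pvGet? (pvWH img) src <;> rfl

theorem pvMod1 (a b c d e : List String) (f : List String → List String) :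
    (pvMk5 a b c d e).modify "time_periods" [] f = pvMk5 (f a) b c d e := by
  simp [pvMk5, PySem.Dict.modify, PySem.Dict.insert, PySem.Dict.contains, PySem.Dict.getD, PySem.Dict.get?]

theorem pvMod2 (a b c d e : List String) (f : List String → List String) :
    (pvMk5 a b c d e).modify "cultural_contexts" [] f = pvMk5 a (f b) c d e := by
  simp [pvMk5, PySem.Dict.modify, PySem.Dict.insert, PySem.Dict.contains, PySem.Dict.getD, PySem.Dict.get?]

theorem pvMod3 (a b c d e : List String) (f : List String → List String) :
    (pvMk5 a b c d e).modify "visual_styles" [] f = pvMk5 a b (f c) d e := by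
  simp [pvMk5, PySem.Dict.modify, PySem.Dict.insert, PySem.Dict.contains, PySem.Dict.getD, PySem.Dict.get?]

theorem pvMod4 (a b c d e : List String) (f : List String → List String) :
    (pvMk5 a b c d e).modify "moods" [] f = pvMk5 a b c (f d) e := by
  simp [pvMk5, PySem.Dict.modify, PySem.Dict.insert, PySem.Dict.contains, PySem.Dict.getD, PySem.Dict.get?]

theorem pvMod5 (a b c d e : List String) (f : List String → List String) :
    (pvMk5 a b c d e).modify "color_palettes" [] f = pvMk5 a b c d (f e) := by
  simp [pvMk5, PySem.Dict.modify, PySem.Dict.insert, PySem.Dict.contains, PySem.Dict.getD, PySem.Dict.get?]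

theorem pvStep1 (a b c d e : List String) (o : Option String) :
    (if pvTruthy o then (pvMk5 a b c d e).modify "time_periods" [] (· ++ [o.getD ""]) else pvMk5 a b c d e)
      = pvMk5 (a ++ (pvColOf o).toList) b c d e := by
  cases o with
  | none => simp [pvTruthy, pvColOf]
  | some s => by_cases h : s = "" <;> simp [pvTruthy, pvColOf, h, pvMod1]

theorem pvStep2 (a b c d e : List String) (o : Option String) :
    (if pvTruthy o then (pvMk5 a b c d e).modify "cultural_contexts" [] (· ++ [o.getD ""]) else pvMk5 a b c d e)
      = pvMk5 a (b ++ (pvColOf o).toList) c d e := by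
  cases o with
  | none => simp [pvTruthy, pvColOf]
  | some s => by_cases h : s = "" <;> simp [pvTruthy, pvColOf, h, pvMod2]

theorem pvStep3 (a b c d e : List String) (o : Option String) :
    (if pvTruthy o then (pvMk5 a b c d e).modify "visual_styles" [] (· ++ [o.getD ""]) else pvMk5 a b c d e)
      = pvMk5 a b (c ++ (pvColOf o).toList) d e := by
  cases o with
  | none => simp [pvTruthy, pvColOf]
  | some s => by_cases h : s = "" <;> simp [pvTruthy, pvColOf, h, pvMod3]

theorem pvStep4 (a b c d e : List String) (o : Option String) :
    (if pvTruthy o then (pvMk5 a b c d e).modify "moods" [] (· ++ [o.getD ""]) else pvMk5 a b c d e)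
      = pvMk5 a b c (d ++ (pvColOf o).toList) e := by
  cases o with
  | none => simp [pvTruthy, pvColOf]
  | some s => by_cases h : s = "" <;> simp [pvTruthy, pvColOf, h, pvMod4]

theorem pvStep5 (a b c d e : List String) (o : Option String) :
    (if pvTruthy o then (pvMk5 a b c d e).modify "color_palettes" [] (· ++ [o.getD ""]) else pvMk5 a b c d e)
      = pvMk5 a b c d (e ++ (pvColOf o).toList) := by
  cases o with
  | none => simp [pvTruthy, pvColOf]
  | some s => by_cases h : s = "" <;> simp [pvTruthy, pvColOf, h, pvMod5]

theorem pvAStep_mk5 (a b c d e : List String) (img : List (String × List (String × String))) :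
    pvAStep (pvMk5 a b c d e) img =
      pvMk5 (a ++ (pvColumn "time_period" img).toList)
            (b ++ (pvColumn "cultural_context" img).toList)
            (c ++ (pvColumn "visual_style" img).toList)
            (d ++ (pvColumn "mood" img).toList)
            (e ++ (pvColumn "color_palette" img).toList) := by
  simp only [pvAStep, pvColumn_eq]
  rw [pvStep1, pvStep2, pvStep3, pvStep4, pvStep5]

theorem pvToList_append_filterMap {α β : Type} (f : α → Option β) (x : α) (xs : List α) :
    (f x).toList ++ xs.filterMap f = (x :: xs).filterMap f := by
  cases h : f x <;> simp [h]

theorem pvFoldl_mk5 (imgs : List (List (String × List (String × String))))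
    (a b c d e : List String) :
    imgs.foldl pvAStep (pvMk5 a b c d e) =
      pvMk5 (a ++ imgs.filterMap (pvColumn "time_period"))
            (b ++ imgs.filterMap (pvColumn "cultural_context"))
            (c ++ imgs.filterMap (pvColumn "visual_style"))
            (d ++ imgs.filterMap (pvColumn "mood"))
            (e ++ imgs.filterMap (pvColumn "color_palette")) := by
  induction imgs generalizing a b c d e with
  | nil => simp
  | cons img rest ih =>
    rw [List.foldl_cons, pvAStep_mk5, ih]
    simp only [List.append_assoc, pvToList_append_filterMap]

-- B-side: leaf, merge and the divide-and-conquer recursion all compute pvS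
theorem pvFilterMap_single {α β : Type} (f : α → Option β) (x : α) :
    [x].filterMap f = (f x).toList := by
  cases h : f x <;> simp [h]

theorem pvLeaf_eq (img : List (String × List (String × String))) :
    pvLeaf img = pvS [img] := by
  simp [pvLeaf, pvS, pvFilterMap_single]

theorem pvMerge_eq (a b : List (List (String × List (String × String)))) :
    pvMerge (pvS a) (pvS b) = pvS (a ++ b) := by
  simp [pvMerge, pvS, pvFieldMap, pvLookup, List.filterMap_append]

theorem pvDC_eq (imgs : List (List (String × List (String × String)))) :
    pvDC imgs = pvS imgs := by
  induction imgs using pvDC.induct with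
  | case1 => simp [pvDC, pvS]
  | case2 img => rw [pvDC, pvLeaf_eq]
  | case3 x y rest ih1 ih2 =>
    rw [pvDC, ih1, ih2, pvMerge_eq, List.take_append_drop]

-- ===== VERDICT =====
theorem collect_world_hints_py_spec : Claim_equal_collect_world_hints_py := by
  intro imgs _
  unfold Spec_collect_world_hints_py collect_world_hints_py collect_world_hints_py_alt
  have hinit : (((((PySem.Dict.empty.insert "time_periods" ([] : List String)).insert "cultural_contexts" []).insert
        "visual_styles" []).insert "moods" []).insert "color_palettes" []) = pvMk5 [] [] [] [] [] := by
    decide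
  rw [hinit]
  rw [pvDC_eq]
  simp only [pvFoldl_mk5]
  simp [pvMk5, pvS, pvFieldMap]
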